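-- pv_equiv track=rewrite | github.com/Pythonierista/EPAM_hometasks | task_4_ex_1.py | swap_quotes
-- ===== SOURCE A (Python) =====
-- def swap_quotes(s):
--     i = 0
--     result = list(s)
--     for a in s:
--         if a == '"':
--             result[i] = "'"
--         elif a == "'":
--             result[i] = '"'
--         i += 1
--     return ''.join(result)
-- ===== SOURCE B (Python) =====
-- def swap_quotes(s):
--     # Split on single quotes; inside each piece, turn double quotes into single
--     # ones by split/join; then rejoin the pieces with double quotes.
--     return '"'.join("'".join(piece.split('"')) for piece in s.split("'"))
-- ===== Notes on version B (the rewrite author's own statement) =====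
-- stated objective: alternative
-- what changed: Replaced the index-tracking loop that mutates a char list in place with a split/join pipeline: split on single quotes, rewrite double quotes inside each piece by an inner split/join, and rejoin the pieces with double quotes.
import Mathlib
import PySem

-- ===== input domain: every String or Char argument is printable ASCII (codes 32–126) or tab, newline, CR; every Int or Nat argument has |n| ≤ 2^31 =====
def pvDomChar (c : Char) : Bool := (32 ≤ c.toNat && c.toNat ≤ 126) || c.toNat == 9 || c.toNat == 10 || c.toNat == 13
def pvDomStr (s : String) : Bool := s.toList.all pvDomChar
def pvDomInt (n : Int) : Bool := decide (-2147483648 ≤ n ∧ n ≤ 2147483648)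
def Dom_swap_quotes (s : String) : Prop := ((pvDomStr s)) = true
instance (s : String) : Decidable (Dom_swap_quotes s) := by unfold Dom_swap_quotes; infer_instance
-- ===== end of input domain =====

-- B replaces A's index-tracking in-place char-list mutation loop with a split/join
-- pipeline (split on single quotes, inner split/join rewrites double quotes, rejoin
-- with double quotes); alternative decomposition, same cost.

-- ===== PORT A =====
-- literal port of A: i = 0; result = list(s); for a in s: mutate result[i]; i += 1; join
def swap_quotes (s : String) : String :=
  let init : Nat × List Char := (0, s.toList)
  let fin := s.toList.foldl (fun (st : Nat × List Char) (a : Char) =>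
    let i := st.1
    let result := st.2
    let result :=
      if a = '"' then result.set i '\''
      else if a = '\'' then result.set i '"'
      else result
    (i + 1, result)) init
  String.ofList fin.2

-- ===== PORT B =====
-- port of B: '"'.join("'".join(piece.split('"')) for piece in s.split("'")).
-- Python str.split with a ONE-character separator is exactly List.splitOn of that
-- character over the code points (empty pieces kept, leading/trailing included);
-- sep.join is PySem.Chars.join (= List.intercalate).
def swap_quotes_alt (s : String) : String :=
  String.ofList (PySem.Chars.join ['"']
    ((s.toList.splitOn '\'').map
      (fun piece => PySem.Chars.join ['\''] (piece.splitOn '"'))))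

-- ===== PRECONDITION & SPEC =====
def Spec_swap_quotes (s : String) (out : String) : Prop := out = swap_quotes_alt s
instance (s : String) (out : String) : Decidable (Spec_swap_quotes s out) := by unfold Spec_swap_quotes; infer_instance

-- ===== CLAIM (what is proved, stated in full; the proofs are below) =====
def Claim_equal_swap_quotes : Prop := ∀ (s : String), Dom_swap_quotes s → Spec_swap_quotes s (swap_quotes s)

-- ===== LEMMAS AND PROOFS =====

-- the character map both sides implement
def pvSwapChar (c : Char) : Char :=
  if c = '"' then '\'' else if c = '\'' then '"' else c

-- A-side loop invariant: starting at index pre.length over the remaining chars cs,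
-- with result = pre ++ cs, the loop rewrites the suffix to cs.map pvSwapChar
theorem swapA_loop_eq (cs pre : List Char) :
    (cs.foldl (fun (st : Nat × List Char) (a : Char) =>
      let i := st.1
      let result := st.2
      let result :=
        if a = '"' then result.set i '\''
        else if a = '\'' then result.set i '"'
        else result
      (i + 1, result)) (pre.length, pre ++ cs)).2 = pre ++ cs.map pvSwapChar := by
  induction cs generalizing pre with
  | nil => simp
  | cons c cs ih =>
    simp only [List.foldl_cons, List.map_cons]
    have hset : ∀ x : Char, (pre ++ c :: cs).set pre.length x = (pre ++ [x]) ++ cs := by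
      intro x
      rw [List.set_append_right _ _ (le_refl _)]
      simp
    by_cases h1 : c = '"'
    · have := ih (pre ++ ['\''])
      simp only [h1] at *
      simpa [hset, pvSwapChar] using this
    · by_cases h2 : c = '\''
      · have := ih (pre ++ ['"'])
        simp only [h2] at *
        simpa [hset, h1, pvSwapChar] using this
      · have := ih (pre ++ [c])
        simpa [h1, h2, pvSwapChar] using this

theorem intercalate_cons_ne_nil {α : Type} (sep y : List α) (ys : List (List α)) (h : ys ≠ []) :
    List.intercalate sep (y :: ys) = y ++ sep ++ List.intercalate sep ys := by
  cases ys with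
  | nil => exact absurd rfl h
  | cons z zs => simp [List.intercalate, List.intersperse]

-- joining the g-mapped pieces of splitOnP p with [b] = mapping the whole list,
-- sending p-chars to b and the rest through g
theorem join_splitOnP_map (p : Char → Bool) (b : Char) (g : Char → Char) (l : List Char) :
    List.intercalate [b] ((l.splitOnP p).map (List.map g))
      = l.map (fun c => if p c then b else g c) := by
  induction l with
  | nil => simp [List.splitOnP_nil, List.intercalate]
  | cons x xs ih =>
    rw [List.splitOnP_cons]
    by_cases hp : p x
    · obtain ⟨h, t, he⟩ := List.exists_cons_of_ne_nil (List.splitOnP_ne_nil p xs)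
      simp only [hp, if_true, List.map_cons, List.map_nil]
      rw [intercalate_cons_ne_nil _ _ _ (by rw [he]; simp)]
      simp [ih]
    · obtain ⟨h, t, he⟩ := List.exists_cons_of_ne_nil (List.splitOnP_ne_nil p xs)
      rw [if_neg hp, he, List.modifyHead_cons]
      rw [he] at ih
      cases t with
      | nil =>
        simp only [List.map_cons, List.map_nil, List.intercalate, List.intersperse,
          List.flatten, List.append_nil, List.append_eq] at ih ⊢
        simp [hp, ih]
      | cons u us =>
        simp only [List.map_cons] at ih ⊢
        rw [intercalate_cons_ne_nil _ _ _ (by simp)] at ih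
        rw [intercalate_cons_ne_nil _ _ _ (by simp)]
        simp only [List.cons_append]
        simp [hp, ih]

-- inner pass: "'".join(piece.split('"')) turns every '"' into '\''
theorem inner_join_eq (piece : List Char) :
    PySem.Chars.join ['\''] (piece.splitOn '"')
      = piece.map (fun c => if c = '"' then '\'' else c) := by
  have := join_splitOnP_map (· == '"') '\'' id piece
  simpa [PySem.Chars.join, List.splitOn] using this

-- B computes map pvSwapChar
theorem swapB_eq_map (l : List Char) :
    PySem.Chars.join ['"']
      ((l.splitOn '\'').map (fun piece => PySem.Chars.join ['\''] (piece.splitOn '"')))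
      = l.map pvSwapChar := by
  have hmap : (l.splitOn '\'').map
      (fun piece => PySem.Chars.join ['\''] (piece.splitOn '"'))
      = (l.splitOn '\'').map (List.map (fun c => if c = '"' then '\'' else c)) := by
    exact List.map_congr_left (fun piece _ => inner_join_eq piece)
  rw [hmap]
  have := join_splitOnP_map (· == '\'') '"' (fun c => if c = '"' then '\'' else c) l
  simp only [PySem.Chars.join, List.splitOn]
  rw [this]
  apply List.map_congr_left
  intro c _
  by_cases h1 : c = '\''
  · simp [pvSwapChar, h1]
  · by_cases h2 : c = '"' <;> simp [pvSwapChar, h1, h2]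

-- ===== VERDICT (by name: the statement is the Claim_ definition above) =====
theorem swap_quotes_spec : Claim_equal_swap_quotes := by
  intro s _
  unfold Spec_swap_quotes swap_quotes swap_quotes_alt
  have hA := swapA_loop_eq s.toList []
  rw [swapB_eq_map]
  simpa using congrArg String.ofList hA
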